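-- pv_equiv track=rewrite | github.com/piretjanson/adventofcode2022 | day_1.py | count_calories
-- ===== SOURCE A (Python) =====
-- def count_calories(lines):
--     totals = []
--     total = 0
--     for line in lines:
--         if line.strip():
--             total += int(line)
--         else:
--             totals.append(total)
--             total = 0
--     return totals
-- ===== SOURCE B (Python) =====
-- def count_calories(lines):
--     # Find the delimiter positions, then sum each slice between consecutive
--     # boundaries (blank lines, plus the end of the list); the trailing group
--     # has no terminating blank line, so it is dropped from the result.
--     blanks = [i for i, line in enumerate(lines) if not line.strip()]
--     totals = []
--     prev = 0
--     for b in blanks + [len(lines)]: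
--         totals.append(sum(int(x) for x in lines[prev:b]))
--         prev = b + 1
--     return totals[:-1]
-- ===== Notes on version B (the rewrite author's own statement) =====
-- stated objective: alternative
-- what changed: B first collects the indices of blank (whitespace-only) lines and then emits one sum(int(x) for x in slice) per slice between consecutive blanks, instead of A's single pass with a running total and reset.
import Mathlib
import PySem

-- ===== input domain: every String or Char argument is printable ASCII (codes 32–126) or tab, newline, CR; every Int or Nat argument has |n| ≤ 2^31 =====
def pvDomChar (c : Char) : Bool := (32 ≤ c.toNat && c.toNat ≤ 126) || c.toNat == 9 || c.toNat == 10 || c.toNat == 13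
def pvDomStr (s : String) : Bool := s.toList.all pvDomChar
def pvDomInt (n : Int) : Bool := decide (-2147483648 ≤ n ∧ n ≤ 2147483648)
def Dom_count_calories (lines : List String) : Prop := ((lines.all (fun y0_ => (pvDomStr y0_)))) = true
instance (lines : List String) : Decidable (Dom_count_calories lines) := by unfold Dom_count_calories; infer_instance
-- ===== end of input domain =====

-- B finds the blank-line indices first and sums each slice between consecutive
-- blanks, instead of A's running-total accumulator loop (alternative decomposition).


-- ===== PORT A =====
def count_calories (lines : List String) : List Int :=
  (lines.foldl
    (fun (st : List Int × Int) line =>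
      if PySem.Str.strip line ≠ "" then (st.1, st.2 + (PySem.Int.ofStr? line).getD 0)
      else (st.1 ++ [st.2], 0))
    ([], 0)).1

-- ===== PORT B =====
def count_calories_alt (lines : List String) : List Int :=
  let blanks := ((PySem.List.enumerate lines).filter (fun p => PySem.Str.strip p.2 == "")).map (·.1)
  let totals := ((blanks ++ [(lines.length : Int)]).foldl
    (fun (st : List Int × Int) b =>
      (st.1 ++ [((PySem.List.slice lines (some st.2) (some b)).map
                  (fun x => (PySem.Int.ofStr? x).getD 0)).sum], b + 1))
    ([], 0)).1
  PySem.List.slice totals none (some (-1))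

-- ===== PRECONDITION & SPEC =====
-- Pre_ excludes exactly the inputs where A raises ValueError: a non-blank line that int() rejects.
def Pre_count_calories (lines : List String) : Prop :=
  ∀ l ∈ lines, PySem.Str.strip l ≠ "" → (PySem.Int.ofStr? l).isSome
instance (lines : List String) : Decidable (Pre_count_calories lines) := by
  unfold Pre_count_calories; infer_instance
def pvWitness_count_calories : List String := ["1", "2", "", "3"]

def Spec_count_calories (lines : List String) (out : List Int) : Prop := out = count_calories_alt lines
instance (lines : List String) (out : List Int) : Decidable (Spec_count_calories lines out) := by unfold Spec_count_calories; infer_instance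

-- ===== CLAIM (what is proved, stated in full; the proofs are below) =====
def Claim_equal_count_calories : Prop := ∀ (lines : List String), Dom_count_calories lines → Pre_count_calories lines → Spec_count_calories lines (count_calories lines)

-- ===== LEMMAS AND PROOFS =====

def pvVal (s : String) : Int := (PySem.Int.ofStr? s).getD 0
def pvBlank (s : String) : Bool := PySem.Str.strip s == ""

-- common reference value: the group sums
def pvSpec : List String → List Int
  | [] => []
  | l :: ls =>
      if pvBlank l then 0 :: pvSpec ls
      else match pvSpec ls with
           | [] => []
           | s :: ss => (pvVal l + s) :: ss

def pvAdd (t : Int) : List Int → List Int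
  | [] => []
  | s :: ss => (t + s) :: ss

-- blank-line positions (Nat version, proof side)
def pvBlanks : List String → List Nat
  | [] => []
  | l :: ls => if pvBlank l then 0 :: (pvBlanks ls).map (· + 1) else (pvBlanks ls).map (· + 1)

lemma pvAdd_zero (l : List Int) : pvAdd 0 l = l := by
  cases l <;> simp [pvAdd]

lemma A_fold (ls : List String) : ∀ (acc : List Int) (t : Int),
    (ls.foldl
      (fun (st : List Int × Int) line =>
        if PySem.Str.strip line ≠ "" then (st.1, st.2 + (PySem.Int.ofStr? line).getD 0)
        else (st.1 ++ [st.2], 0))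
      (acc, t)).1 = acc ++ pvAdd t (pvSpec ls) := by
  induction ls with
  | nil => intro acc t; simp [pvSpec, pvAdd]
  | cons l ls ih =>
    intro acc t
    by_cases h : pvBlank l
    · have h' : PySem.Str.strip l = "" := by simpa [pvBlank] using h
      rw [List.foldl_cons, if_neg (by simp [h']), ih, pvAdd_zero]
      simp [pvSpec, h, pvAdd]
    · have h' : PySem.Str.strip l ≠ "" := by simpa [pvBlank] using h
      rw [List.foldl_cons, if_pos h', ih]
      cases hs : pvSpec ls with
      | nil => simp [pvSpec, h, hs, pvAdd]
      | cons s ss => simp [pvSpec, h, hs, pvAdd, pvVal]; ring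

lemma pvSpec_len (ls : List String) : (pvSpec ls).length = (pvBlanks ls).length := by
  induction ls with
  | nil => rfl
  | cons l ls ih =>
    by_cases h : pvBlank l
    · simp [pvSpec, pvBlanks, h, ih]
    · simp only [pvSpec, pvBlanks, if_neg h]
      cases hs : pvSpec ls with
      | nil => simp [← ih, hs]
      | cons s ss => simp [← ih, hs]

lemma enum_blanks (ls : List String) : ∀ (s : Int),
    (((PySem.List.enumerate ls s).filter (fun p => PySem.Str.strip p.2 == "")).map (·.1))
      = (pvBlanks ls).map (fun n : Nat => s + (n : Int)) := by
  induction ls with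
  | nil => intro s; simp [pvBlanks]
  | cons l ls ih =>
    intro s
    by_cases h : pvBlank l
    · have h' : (PySem.Str.strip l == "") = true := h
      rw [PySem.List.enumerate_cons, List.filter_cons]
      simp only [h', if_pos, List.map_cons, ih (s + 1), pvBlanks, if_pos h, List.map_map]
      refine List.cons_eq_cons.mpr ⟨by simp, ?_⟩
      apply List.map_congr_left; intro n _
      simp [Function.comp]; ring
    · have h' : (PySem.Str.strip l == "") = false := by simpa [pvBlank] using h
      rw [PySem.List.enumerate_cons, List.filter_cons]
      simp only [h', Bool.false_eq_true, if_false, ih (s + 1), pvBlanks, if_neg h, List.map_map]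
      apply List.map_congr_left; intro n _
      simp [Function.comp]; ring

-- B's fold over the blank indices, abbreviated (definitionally the port's lambda)
def pvBStep (lines : List String) (st : List Int × Int) (b : Int) : List Int × Int :=
  (st.1 ++ [((PySem.List.slice lines (some st.2) (some b)).map
              (fun x => (PySem.Int.ofStr? x).getD 0)).sum], b + 1)

lemma B_acc (bs : List Int) (lines : List String) : ∀ (acc : List Int) (p : Int),
    (bs.foldl (pvBStep lines) (acc, p)).1 = acc ++ (bs.foldl (pvBStep lines) ([], p)).1 := by
  induction bs with
  | nil => intro acc p; simp
  | cons b bs ih =>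
    intro acc p
    simp only [List.foldl_cons, pvBStep]
    rw [ih, ih ([] ++ [((PySem.List.slice lines (some p) (some b)).map
          (fun x => (PySem.Int.ofStr? x).getD 0)).sum])]
    simp

lemma B_shift (bs : List Nat) (l : String) (lines : List String) : ∀ (acc : List Int) (p : Nat),
    ((bs.map (fun n : Nat => ((n + 1 : Nat) : Int))).foldl (pvBStep (l :: lines)) (acc, ((p + 1 : Nat) : Int))).1
      = ((bs.map (fun n : Nat => ((n : Nat) : Int))).foldl (pvBStep lines) (acc, ((p : Nat) : Int))).1 := by
  induction bs with
  | nil => intro acc p; simp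
  | cons b bs ih =>
    intro acc p
    simp only [List.map_cons, List.foldl_cons, pvBStep]
    rw [PySem.List.slice_natCast, PySem.List.slice_natCast]
    have hdrop : ((l :: lines).drop (p + 1)).take ((b + 1) - (p + 1))
        = (lines.drop p).take (b - p) := by simp
    rw [hdrop]
    have h2 : (((b + 1 : Nat) : Int) + 1) = ((((b + 1) + 1 : Nat)) : Int) := by push_cast; ring
    rw [h2, ih _ (b + 1)]
    have h3 : (((b : Nat) : Int) + 1) = ((b + 1 : Nat) : Int) := by push_cast; ring
    rw [h3]

lemma B_main (ls : List String) :
    (((pvBlanks ls).map (fun n : Nat => ((n : Nat) : Int))).foldl (pvBStep ls) ([], 0)).1 = pvSpec ls := by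
  induction ls with
  | nil => simp [pvBlanks, pvSpec]
  | cons l ls ih =>
    by_cases h : pvBlank l
    · -- blank head: emits 0, then the rest shifted by one
      simp only [pvBlanks, if_pos h, List.map_cons, List.foldl_cons, pvBStep, List.map_map, Nat.cast_zero]
      have h0 : PySem.List.slice (l :: ls) (some ((0 : Nat) : Int)) (some ((0 : Nat) : Int)) = [] := by
        rw [PySem.List.slice_natCast]; simp
      simp only [Nat.cast_zero] at h0
      rw [h0]
      have hm : (pvBlanks ls).map ((fun n : Nat => ((n : Nat) : Int)) ∘ (· + 1))
          = ((pvBlanks ls).map (fun n : Nat => ((n + 1 : Nat) : Int))) := by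
        apply List.map_congr_left; intro n _; simp [Function.comp]
      rw [hm]
      have hz : ((0 : Int) + 1) = ((0 + 1 : Nat) : Int) := by norm_num
      rw [hz, B_shift, B_acc]
      simp only [Nat.cast_zero]
      rw [ih]
      simp [pvSpec, h]
    · -- non-blank head: the first group gains pvVal l
      simp only [pvBlanks, if_neg h, List.map_map]
      have hm : (pvBlanks ls).map ((fun n : Nat => ((n : Nat) : Int)) ∘ (· + 1))
          = ((pvBlanks ls).map (fun n : Nat => ((n + 1 : Nat) : Int))) := by
        apply List.map_congr_left; intro n _; simp [Function.comp]
      rw [hm]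
      cases hb : pvBlanks ls with
      | nil =>
        have hlen := pvSpec_len ls
        rw [hb] at hlen
        have hsp : pvSpec ls = [] := List.eq_nil_of_length_eq_zero hlen
        simp [pvSpec, h, hsp]
      | cons b bs =>
        simp only [List.map_cons, List.foldl_cons, pvBStep]
        have hsl : PySem.List.slice (l :: ls) (some (0 : Int)) (some ((b + 1 : Nat) : Int))
            = l :: (ls.drop 0).take b := by
          rw [show (0 : Int) = ((0 : Nat) : Int) by norm_num, PySem.List.slice_natCast]
          simp
        have h2 : (((b + 1 : Nat) : Int) + 1) = ((((b + 1) + 1 : Nat)) : Int) := by push_cast; ring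
        rw [hsl, h2, B_shift, B_acc]
        have ihs : pvSpec ls
            = ((((ls.drop 0).take b).map (fun x => (PySem.Int.ofStr? x).getD 0)).sum)
              :: ((bs.map (fun n : Nat => ((n : Nat) : Int))).foldl (pvBStep ls) ([], ((b + 1 : Nat) : Int))).1 := by
          rw [← ih, hb]
          simp only [List.map_cons, List.foldl_cons, pvBStep]
          rw [B_acc]
          have hsl2 : PySem.List.slice ls (some (0 : Int)) (some ((b : Nat) : Int))
              = (ls.drop 0).take b := by
            rw [show (0 : Int) = ((0 : Nat) : Int) by norm_num, PySem.List.slice_natCast]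
            simp
          have h3 : (((b : Nat) : Int) + 1) = ((b + 1 : Nat) : Int) := by push_cast; ring
          rw [hsl2, h3]
          simp
        rw [show pvSpec (l :: ls)
              = match pvSpec ls with
                | [] => []
                | s :: ss => (pvVal l + s) :: ss from by simp [pvSpec, h]]
        rw [ihs]
        simp [pvVal]

lemma B_eq (lines : List String) : count_calories_alt lines = pvSpec lines := by
  simp only [count_calories_alt]
  have hstep : (fun (st : List Int × Int) b =>
      (st.1 ++ [((PySem.List.slice lines (some st.2) (some b)).map
                  (fun x => (PySem.Int.ofStr? x).getD 0)).sum], b + 1)) = pvBStep lines := rfl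
  rw [hstep, enum_blanks lines 0]
  have hz : (pvBlanks lines).map (fun n : Nat => (0 : Int) + (n : Int))
      = (pvBlanks lines).map (fun n : Nat => ((n : Nat) : Int)) := by
    apply List.map_congr_left; intro n _; ring
  rw [hz, List.foldl_append, List.foldl_cons, List.foldl_nil, PySem.List.slice_to_neg_one]
  simp only [pvBStep]
  rw [List.dropLast_concat]
  exact B_main lines

-- ===== VERDICT (by name: the statement is the Claim_ definition above) =====
theorem count_calories_spec : Claim_equal_count_calories := by
  intro lines _ _
  unfold Spec_count_calories count_calories
  rw [A_fold, pvAdd_zero, B_eq]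
  simp
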